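-- pv_equiv track=rewrite | github.com/ps48/Sou-Fi | hashing_algo.py | hashToId
-- ===== SOURCE A (Python) =====
-- def hashToId(surl):
--     ts = 0
--     for i in surl:
--         if("A"<=i and i<="F"):
--             ts = ts*128 + ord(i) - ord('A')
--         if("0"<=i and i<="9"):
--             ts = ts*128 + ord(i) - ord('0') + 6;
--     return ts
-- ===== SOURCE B (Python) =====
-- def hashToId(surl):
--     vals = []
--     for c in surl:
--         if "A" <= c <= "F":
--             vals.append(ord(c) - ord("A"))
--         elif "0" <= c <= "9":
--             vals.append(ord(c) - ord("0") + 6)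
--     n = len(vals)
--     return sum(v * 128 ** (n - 1 - k) for k, v in enumerate(vals))
-- ===== Notes on version B (the rewrite author's own statement) =====
-- stated objective: alternative
-- what changed: Replaces the Horner running-accumulator fold with a build-the-digit-list-then-weighted-positional-power-sum decomposition (value_k * 128**(n-1-k)).
import Mathlib
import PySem

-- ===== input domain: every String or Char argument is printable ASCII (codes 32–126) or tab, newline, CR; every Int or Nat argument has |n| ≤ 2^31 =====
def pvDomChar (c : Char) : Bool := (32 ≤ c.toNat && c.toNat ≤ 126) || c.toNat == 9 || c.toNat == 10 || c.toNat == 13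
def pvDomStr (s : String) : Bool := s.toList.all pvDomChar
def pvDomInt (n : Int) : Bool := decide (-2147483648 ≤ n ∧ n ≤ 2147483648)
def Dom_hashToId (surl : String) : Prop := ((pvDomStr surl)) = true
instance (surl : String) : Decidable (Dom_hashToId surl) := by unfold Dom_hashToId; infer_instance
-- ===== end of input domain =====

-- B replaces A's Horner running-accumulator fold by building the digit list first and
-- returning the weighted positional power sum (alternative decomposition, same cost).


-- ===== PORT A =====
def hashToId (surl : String) : Int :=
  surl.toList.foldl (fun ts i =>
    let ts1 := if 'A' ≤ i ∧ i ≤ 'F' then ts * 128 + (i.toNat : Int) - 65 else ts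
    let ts2 := if '0' ≤ i ∧ i ≤ '9' then ts1 * 128 + (i.toNat : Int) - 48 + 6 else ts1
    ts2) 0

-- ===== PORT B =====
def hashToId_alt (surl : String) : Int :=
  let vals : List Int := surl.toList.foldl (fun vals c =>
    if 'A' ≤ c ∧ c ≤ 'F' then vals ++ [(c.toNat : Int) - 65]
    else if '0' ≤ c ∧ c ≤ '9' then vals ++ [(c.toNat : Int) - 48 + 6]
    else vals) []
  let n : Int := vals.length
  ((PySem.List.enumerate vals).map (fun p => p.2 * (128 : Int) ^ ((n - 1 - p.1).toNat))).sum

-- ===== PRECONDITION & SPEC =====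
def Spec_hashToId (surl : String) (out : Int) : Prop := out = hashToId_alt surl
instance (surl : String) (out : Int) : Decidable (Spec_hashToId surl out) := by unfold Spec_hashToId; infer_instance

-- ===== CLAIM (what is proved, stated in full; the proofs are below) =====
def Claim_equal_hashToId : Prop := ∀ (surl : String), Dom_hashToId surl → Spec_hashToId surl (hashToId surl)

-- ===== LEMMAS AND PROOFS =====

/-- The digit value of one character, shared characterisation of both ports' branches. -/
def pvDig (c : Char) : Option Int :=
  if 'A' ≤ c ∧ c ≤ 'F' then some ((c.toNat : Int) - 65)
  else if '0' ≤ c ∧ c ≤ '9' then some ((c.toNat : Int) - 48 + 6)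
  else none

/-- Horner evaluation over a digit list. -/
def pvHorner (ds : List Int) (ts : Int) : Int := ds.foldl (fun a v => a * 128 + v) ts

lemma pvStepA (ts : Int) (c : Char) :
    (if '0' ≤ c ∧ c ≤ '9' then
       (if 'A' ≤ c ∧ c ≤ 'F' then ts * 128 + (c.toNat : Int) - 65 else ts) * 128
         + (c.toNat : Int) - 48 + 6
     else if 'A' ≤ c ∧ c ≤ 'F' then ts * 128 + (c.toNat : Int) - 65 else ts)
    = match pvDig c with
      | some v => ts * 128 + v
      | none => ts := by
  by_cases h1 : 'A' ≤ c ∧ c ≤ 'F'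
  · have h2 : ¬ ('0' ≤ c ∧ c ≤ '9') := by
      rintro ⟨_, hb⟩
      have ha := h1.1
      simp only [Char.le_def, UInt32.le_iff_toNat_le] at ha hb
      have e1 : 'A'.val.toNat = 65 := by decide
      have e2 : '9'.val.toNat = 57 := by decide
      omega
    simp only [pvDig, if_pos h1, if_neg h2]
    ring
  · by_cases h2 : '0' ≤ c ∧ c ≤ '9'
    · simp only [pvDig, if_neg h1, if_pos h2]
      ring
    · simp only [pvDig, if_neg h1, if_neg h2]

lemma pvFoldA (l : List Char) (ts : Int) :
    l.foldl (fun ts i =>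
      let ts1 := if 'A' ≤ i ∧ i ≤ 'F' then ts * 128 + (i.toNat : Int) - 65 else ts
      let ts2 := if '0' ≤ i ∧ i ≤ '9' then ts1 * 128 + (i.toNat : Int) - 48 + 6 else ts1
      ts2) ts = pvHorner (l.filterMap pvDig) ts := by
  induction l generalizing ts with
  | nil => simp [pvHorner]
  | cons c l ih =>
    simp only [List.foldl_cons, List.filterMap_cons]
    rw [pvStepA]
    cases h : pvDig c with
    | none => simpa using ih ts
    | some v => simpa [pvHorner] using ih (ts * 128 + v)

lemma pvFoldB (l : List Char) (acc : List Int) :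
    l.foldl (fun vals c =>
      if 'A' ≤ c ∧ c ≤ 'F' then vals ++ [(c.toNat : Int) - 65]
      else if '0' ≤ c ∧ c ≤ '9' then vals ++ [(c.toNat : Int) - 48 + 6]
      else vals) acc = acc ++ l.filterMap pvDig := by
  induction l generalizing acc with
  | nil => simp
  | cons c l ih =>
    simp only [List.foldl_cons, List.filterMap_cons]
    by_cases h1 : 'A' ≤ c ∧ c ≤ 'F'
    · rw [if_pos h1, ih]
      simp [pvDig, h1]
    · by_cases h2 : '0' ≤ c ∧ c ≤ '9'
      · rw [if_neg h1, if_pos h2, ih]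
        simp [pvDig, h1, h2]
      · rw [if_neg h1, if_neg h2, ih]
        simp [pvDig, h1, h2]

lemma pvHorner_shift (ds : List Int) (ts : Int) :
    pvHorner ds ts = ts * 128 ^ ds.length + pvHorner ds 0 := by
  induction ds generalizing ts with
  | nil => simp [pvHorner]
  | cons v ds ih =>
    simp only [pvHorner, List.foldl_cons, List.length_cons] at *
    rw [ih (ts * 128 + v), ih (0 * 128 + v)]
    ring

lemma pvPsum_gen (ds : List Int) (s : Int) :
    ((PySem.List.enumerate ds s).map
      (fun p => p.2 * (128 : Int) ^ ((s + (ds.length : Int) - 1 - p.1).toNat))).sum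
    = pvHorner ds 0 := by
  induction ds generalizing s with
  | nil => simp [pvHorner]
  | cons v ds ih =>
    rw [PySem.List.enumerate_cons]
    simp only [List.map_cons, List.sum_cons, List.length_cons]
    have he : (fun p : Int × Int =>
        p.2 * (128 : Int) ^ ((s + ((ds.length + 1 : Nat) : Int) - 1 - p.1).toNat))
        = (fun p : Int × Int =>
        p.2 * (128 : Int) ^ (((s + 1) + (ds.length : Int) - 1 - p.1).toNat)) := by
      funext p
      congr 2
      push_cast
      omega
    rw [he, ih (s + 1)]
    have hexp : (s + ((ds.length + 1 : Nat) : Int) - 1 - s).toNat = ds.length := by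
      push_cast
      omega
    rw [hexp]
    have : pvHorner (v :: ds) 0 = pvHorner ds v := by simp [pvHorner]
    rw [this, pvHorner_shift ds v]

-- ===== VERDICT (by name: the statement is the Claim_ definition above) =====
theorem hashToId_spec : Claim_equal_hashToId := by
  intro surl _
  unfold Spec_hashToId hashToId hashToId_alt
  rw [pvFoldA, pvFoldB]
  simp only [List.nil_append]
  rw [show ∀ ds : List Int, ((PySem.List.enumerate ds).map
        (fun p => p.2 * (128 : Int) ^ (((ds.length : Int) - 1 - p.1).toNat))).sum
      = pvHorner ds 0 from fun ds => by
        have := pvPsum_gen ds 0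
        simpa using this]
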